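-- pv_equiv track=rewrite | github.com/drewcavicchi/DM2021_FinalProject_SalmonChaos | workers.py | get_doc_to_docs_with_overlap_dict
-- ===== SOURCE A (Python) =====
-- def get_doc_to_docs_with_overlap_dict(doc_to_keyword_lst_dict):
--     # get list of lists of overlapping keys per document
--     doc_to_docs_with_overlap_dict = {}
--     for doc_id, keywords_lst in doc_to_keyword_lst_dict.items():
--         keyword_set = set(keywords_lst)
--         for doc_id_next, keywords_lst_next in doc_to_keyword_lst_dict.items():
--             if doc_id_next != doc_id:
--                 keyword_set_next = set(keywords_lst_next)
--                 intersection = keyword_set.intersection(keyword_set_next)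
--                 if intersection:
--                     if doc_id in doc_to_docs_with_overlap_dict:
--                         doc_to_docs_with_overlap_dict[doc_id][doc_id_next] = intersection
--                     else:
--                         doc_to_docs_with_overlap_dict[doc_id] = {doc_id_next: intersection}
--     return doc_to_docs_with_overlap_dict
-- ===== SOURCE B (Python) =====
-- def get_doc_to_docs_with_overlap_dict(doc_to_keyword_lst_dict):
--     # Inverted index: keyword -> docs containing it; only co-occurring pairs are visited.
--     pos = {doc_id: i for i, doc_id in enumerate(doc_to_keyword_lst_dict)}
--     distinct = {doc_id: list(dict.fromkeys(kws))
--                 for doc_id, kws in doc_to_keyword_lst_dict.items()}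
--     index = {}
--     for doc_id, uniq in distinct.items():
--         for kw in uniq:
--             index.setdefault(kw, []).append(doc_id)
--     result = {}
--     for doc_id, uniq in distinct.items():
--         overlaps = {}
--         for kw in uniq:
--             for other in index[kw]:
--                 if other != doc_id:
--                     overlaps.setdefault(other, []).append(kw)
--         if overlaps:
--             result[doc_id] = {other: set(overlaps[other])
--                               for other in sorted(overlaps, key=lambda o: pos[o])}
--     return result
-- ===== Notes on version B (the rewrite author's own statement) =====
-- stated objective: faster
-- what changed: A intersects every ordered pair of documents (D^2 set intersections); B builds an inverted index keyword->documents once and accumulates shared keywords only for pairs that actually co-occur under some keyword, restoring document order per row with one sort.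
import Mathlib
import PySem

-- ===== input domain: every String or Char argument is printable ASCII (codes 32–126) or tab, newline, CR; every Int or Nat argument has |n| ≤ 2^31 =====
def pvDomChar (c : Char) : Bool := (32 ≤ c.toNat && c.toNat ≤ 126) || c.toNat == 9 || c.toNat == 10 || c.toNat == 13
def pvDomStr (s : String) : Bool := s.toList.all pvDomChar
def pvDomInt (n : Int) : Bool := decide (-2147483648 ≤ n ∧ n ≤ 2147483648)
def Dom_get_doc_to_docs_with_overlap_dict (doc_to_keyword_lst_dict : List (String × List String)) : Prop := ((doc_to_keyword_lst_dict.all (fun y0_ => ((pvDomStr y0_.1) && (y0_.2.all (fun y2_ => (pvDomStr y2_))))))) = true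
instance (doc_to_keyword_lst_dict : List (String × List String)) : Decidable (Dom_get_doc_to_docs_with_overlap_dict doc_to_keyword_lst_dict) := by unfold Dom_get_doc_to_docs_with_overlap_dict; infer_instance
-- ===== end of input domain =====

-- B replaces A's all-pairs double scan over the documents by an inverted index
-- keyword -> documents, so only pairs that actually share a keyword are visited
-- (objective: faster; the intersection sets themselves are Python sets and are
-- compared as sets, so their internal order is free).

-- ===== PORT A =====
-- literal transliteration of A: nested loop over dict items; the in-place update
-- `result[doc_id][doc_id_next] = intersection` is Dict.insert (overwrites keep position).
def get_doc_to_docs_with_overlap_dict (doc_to_keyword_lst_dict : List (String × List String)) : List (String × List (String × List String)) :=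
  let d :=
    doc_to_keyword_lst_dict.foldl (fun acc p =>
      let keyword_set : PySem.Set String := PySem.Set.ofList p.2
      doc_to_keyword_lst_dict.foldl (fun acc q =>
        if q.1 ≠ p.1 then
          let keyword_set_next : PySem.Set String := PySem.Set.ofList q.2
          let intersection := PySem.Set.inter keyword_set keyword_set_next
          if intersection ≠ [] then
            if acc.contains p.1 then
              acc.insert p.1 ((acc.getD p.1 PySem.Dict.empty).insert q.1 intersection)
            else
              acc.insert p.1 (PySem.Dict.ofList [(q.1, intersection)])
          else acc
        else acc) acc)
      (PySem.Dict.empty : PySem.Dict String (PySem.Dict String (List String)))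
  d.items.map (fun r => (r.1, r.2.items))

-- ===== PORT B =====
-- transliteration of Source B: position map, per-doc dedup, inverted index keyword->docs,
-- then per document accumulate shared keywords per co-occurring doc and sort the row
-- back into document order.  `index[kw]` / `pos[o]` are total lookups in Python
-- (the key is always present); ported as getD with an unused default.
def get_doc_to_docs_with_overlap_dict_alt (doc_to_keyword_lst_dict : List (String × List String)) : List (String × List (String × List String)) :=
  let pos : PySem.Dict String Int :=
    (PySem.List.enumerate (doc_to_keyword_lst_dict.map Prod.fst)).foldl
      (fun d ip => d.insert ip.2 ip.1) PySem.Dict.empty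
  let distinct : PySem.Dict String (List String) :=
    doc_to_keyword_lst_dict.foldl (fun d p => d.insert p.1 (PySem.List.dedup p.2)) PySem.Dict.empty
  let index : PySem.Dict String (List String) :=
    distinct.items.foldl (fun ix p =>
      p.2.foldl (fun ix kw => ix.modify kw [] (· ++ [p.1])) ix) PySem.Dict.empty
  let result : PySem.Dict String (List (String × List String)) :=
    distinct.items.foldl (fun res p =>
      let overlaps : PySem.Dict String (List String) :=
        p.2.foldl (fun ov kw =>
          (index.getD kw []).foldl (fun ov other =>
            if other ≠ p.1 then ov.modify other [] (· ++ [kw]) else ov) ov) PySem.Dict.empty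
      if overlaps.items ≠ [] then
        res.insert p.1 ((PySem.List.sorted overlaps.keys (fun o => pos.getD o 0)).map
          (fun o => (o, PySem.Set.ofList (overlaps.getD o []))))
      else res) PySem.Dict.empty
  result.items

-- ===== PRECONDITION & SPEC =====
-- Pre_ excludes association lists with duplicate doc ids: the Python argument is a
-- dict, whose items list always has distinct keys, so such lists represent no dict.
def Pre_get_doc_to_docs_with_overlap_dict (doc_to_keyword_lst_dict : List (String × List String)) : Prop :=
  (doc_to_keyword_lst_dict.map Prod.fst).Nodup
instance (doc_to_keyword_lst_dict : List (String × List String)) : Decidable (Pre_get_doc_to_docs_with_overlap_dict doc_to_keyword_lst_dict) := by unfold Pre_get_doc_to_docs_with_overlap_dict; infer_instance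

def pvWitness_get_doc_to_docs_with_overlap_dict : (List (String × List String)) :=
  [("a", ["x", "y"]), ("b", ["y", "z"]), ("c", ["q"])]

def Spec_get_doc_to_docs_with_overlap_dict (doc_to_keyword_lst_dict : List (String × List String)) (out : List (String × List (String × List String))) : Prop := out = get_doc_to_docs_with_overlap_dict_alt doc_to_keyword_lst_dict
instance (doc_to_keyword_lst_dict : List (String × List String)) (out : List (String × List (String × List String))) : Decidable (Spec_get_doc_to_docs_with_overlap_dict doc_to_keyword_lst_dict out) := by unfold Spec_get_doc_to_docs_with_overlap_dict; infer_instance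

-- ===== CLAIM (what is proved, stated in full; the proofs are below) =====
def Claim_equal_get_doc_to_docs_with_overlap_dict : Prop := ∀ (doc_to_keyword_lst_dict : List (String × List String)), Dom_get_doc_to_docs_with_overlap_dict doc_to_keyword_lst_dict → Pre_get_doc_to_docs_with_overlap_dict doc_to_keyword_lst_dict → Spec_get_doc_to_docs_with_overlap_dict doc_to_keyword_lst_dict (get_doc_to_docs_with_overlap_dict doc_to_keyword_lst_dict)

-- ===== LEMMAS AND PROOFS =====

lemma key_inj_of_nodup {κ ν : Type} (l : List (κ × ν)) (h : (l.map Prod.fst).Nodup)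
    {p q : κ × ν} (hp : p ∈ l) (hq : q ∈ l) (hk : p.1 = q.1) : p = q :=
  List.inj_on_of_nodup_map h hp hq hk

lemma insert_eq_self_of_get? {κ ν : Type} [BEq κ] [LawfulBEq κ] (d : PySem.Dict κ ν) (k : κ) (v : ν)
    (hv : d.get? k = some v) (hnd : d.keys.Nodup) : d.insert k v = d := by
  have hc : d.contains k = true := by
    rw [PySem.Dict.contains_eq_isSome_get?, hv]; rfl
  apply PySem.Dict.ext
  rw [PySem.Dict.items_insert_of_contains d v hc]
  have hmem : (k, v) ∈ d.items := (PySem.Dict.get?_eq_some_iff_mem_items d k v hnd).mp hv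
  have : ∀ p ∈ d.items, (fun p => if (p.1 == k) = true then (k, v) else p) p = p := by
    intro p hp
    by_cases h : p.1 = k
    · have : p = (k, v) := key_inj_of_nodup d.items hnd hp hmem (by simp [h])
      simp [h, this]
    · simp [h]
  rw [List.map_congr_left this, List.map_id']

def FA (p : String × List String) (acc : PySem.Dict String (PySem.Dict String (List String))) (q : String × List String) : PySem.Dict String (PySem.Dict String (List String)) :=
  if q.1 ≠ p.1 then
    if PySem.Set.inter (PySem.Set.ofList p.2) (PySem.Set.ofList q.2) ≠ [] then
      if acc.contains p.1 then
        acc.insert p.1 ((acc.getD p.1 PySem.Dict.empty).insert q.1 (PySem.Set.inter (PySem.Set.ofList p.2) (PySem.Set.ofList q.2)))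
      else acc.insert p.1 (PySem.Dict.ofList [(q.1, PySem.Set.inter (PySem.Set.ofList p.2) (PySem.Set.ofList q.2))])
    else acc
  else acc

def pvInter (a b : List String) : List String := PySem.Set.inter (PySem.Set.ofList a) (PySem.Set.ofList b)

def pvRowOn (zs : List (String × List String)) (p : String × List String) : List (String × List String) :=
  zs.filterMap (fun q => if q.1 ≠ p.1 ∧ pvInter p.2 q.2 ≠ [] then some (q.1, pvInter p.2 q.2) else none)

lemma pvRowOn_nil (p) : pvRowOn [] p = [] := rfl
lemma pvRowOn_cons (q : String × List String) (zs) (p) :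
    pvRowOn (q :: zs) p = (if q.1 ≠ p.1 ∧ pvInter p.2 q.2 ≠ [] then [(q.1, pvInter p.2 q.2)] else []) ++ pvRowOn zs p := by
  simp only [pvRowOn, List.filterMap_cons]
  split_ifs <;> simp

lemma lemA1 (p : String × List String) (zs : List (String × List String))
    (acc : PySem.Dict String (PySem.Dict String (List String))) (r : PySem.Dict String (List String))
    (hacc : acc.get? p.1 = some r) (hnd : acc.keys.Nodup)
    (hfresh : ∀ q ∈ zs, q.1 ∉ r.keys) (hzs : (zs.map Prod.fst).Nodup) :
    zs.foldl (FA p) acc = acc.insert p.1 (PySem.Dict.mk (r.items ++ pvRowOn zs p)) := by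
  induction zs generalizing acc r with
  | nil =>
    simp only [List.foldl_nil, pvRowOn_nil, List.append_nil]
    rw [show PySem.Dict.mk r.items = r from rfl, insert_eq_self_of_get? acc p.1 r hacc hnd]
  | cons q zs ih =>
    have hcont : acc.contains p.1 = true := by rw [PySem.Dict.contains_eq_isSome_get?, hacc]; rfl
    have hgetD : acc.getD p.1 PySem.Dict.empty = r := by rw [PySem.Dict.getD_eq_get?_getD, hacc]; rfl
    rw [List.foldl_cons, pvRowOn_cons]
    by_cases hq : q.1 ≠ p.1 ∧ pvInter p.2 q.2 ≠ []
    · have hFA : FA p acc q = acc.insert p.1 (r.insert q.1 (pvInter p.2 q.2)) := by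
        simp only [FA, pvInter] at *
        rw [if_pos hq.1, if_pos hq.2, if_pos hcont, hgetD]
      rw [hFA]
      have hqr : r.contains q.1 = false := by
        rw [← Bool.not_eq_true, PySem.Dict.contains_iff_mem_keys]
        exact hfresh q (List.mem_cons_self ..)
      have hitems : (r.insert q.1 (pvInter p.2 q.2)).items = r.items ++ [(q.1, pvInter p.2 q.2)] :=
        PySem.Dict.items_insert_of_not_contains r _ hqr
      have hkeys' : (acc.insert p.1 (r.insert q.1 (pvInter p.2 q.2))).keys.Nodup :=
        PySem.Dict.nodup_keys_insert _ _ _ hnd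
      have hget' : (acc.insert p.1 (r.insert q.1 (pvInter p.2 q.2))).get? p.1 = some _ :=
        PySem.Dict.get?_insert_self ..
      rw [ih _ _ hget' hkeys' ?_ (by simpa using hzs.of_cons)]
      · rw [PySem.Dict.insert_insert_self]
        congr 1
        apply PySem.Dict.ext
        simp [hitems, if_pos hq]
      · intro q' hq' hmem
        rw [show (r.insert q.1 (pvInter p.2 q.2)).keys = r.keys ++ [q.1] by
          simp [PySem.Dict.keys, hitems]] at hmem
        rcases List.mem_append.mp hmem with h | h
        · exact hfresh q' (List.mem_cons_of_mem _ hq') h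
        · simp only [List.mem_singleton] at h
          have : q'.1 ∈ zs.map Prod.fst := List.mem_map_of_mem hq'
          simp only [List.map_cons, List.nodup_cons] at hzs
          exact hzs.1 (h ▸ this)
    · have hFA : FA p acc q = acc := by
        simp only [FA, pvInter] at *
        by_cases h1 : q.1 ≠ p.1
        · exact if_pos h1 |>.trans (if_neg (fun hne => hq ⟨h1, hne⟩))
        · rw [if_neg h1]
      rw [hFA, if_neg hq, List.nil_append]
      exact ih _ _ hacc hnd (fun q' h => hfresh q' (List.mem_cons_of_mem _ h)) (by simpa using hzs.of_cons)

lemma lemA0 (p : String × List String) (zs : List (String × List String))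
    (acc : PySem.Dict String (PySem.Dict String (List String)))
    (hacc : acc.contains p.1 = false) (hnd : acc.keys.Nodup) (hzs : (zs.map Prod.fst).Nodup) :
    zs.foldl (FA p) acc =
      if pvRowOn zs p = [] then acc else acc.insert p.1 (PySem.Dict.mk (pvRowOn zs p)) := by
  induction zs generalizing acc with
  | nil => simp [pvRowOn_nil]
  | cons q zs ih =>
    rw [List.foldl_cons, pvRowOn_cons]
    by_cases hq : q.1 ≠ p.1 ∧ pvInter p.2 q.2 ≠ []
    · have hFA : FA p acc q = acc.insert p.1 (PySem.Dict.mk [(q.1, pvInter p.2 q.2)]) := by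
        simp only [FA, pvInter] at *
        rw [if_pos hq.1, if_pos hq.2, if_neg (by simp [hacc])]
        rfl
      rw [hFA]
      have hget' : (acc.insert p.1 (PySem.Dict.mk [(q.1, pvInter p.2 q.2)])).get? p.1 = some _ :=
        PySem.Dict.get?_insert_self ..
      have hfresh : ∀ q' ∈ zs, q'.1 ∉ (PySem.Dict.mk [(q.1, pvInter p.2 q.2)]).keys := by
        intro q' hq' hmem
        simp only [PySem.Dict.keys, List.map_cons, List.map_nil, List.mem_singleton] at hmem
        have : q'.1 ∈ zs.map Prod.fst := List.mem_map_of_mem hq'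
        simp only [List.map_cons, List.nodup_cons] at hzs
        exact hzs.1 (hmem ▸ this)
      rw [lemA1 p zs _ _ hget' (PySem.Dict.nodup_keys_insert _ _ _ hnd) hfresh (by simpa using hzs.of_cons)]
      rw [PySem.Dict.insert_insert_self, if_pos hq, if_neg (by simp)]
    · have hFA : FA p acc q = acc := by
        simp only [FA, pvInter] at *
        by_cases h1 : q.1 ≠ p.1
        · exact if_pos h1 |>.trans (if_neg (fun hne => hq ⟨h1, hne⟩))
        · rw [if_neg h1]
      rw [hFA, if_neg hq, List.nil_append]
      exact ih acc hacc hnd (by simpa using hzs.of_cons)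

def pvCanonD (xs ys : List (String × List String)) : List (String × PySem.Dict String (List String)) :=
  ys.filterMap (fun p => if pvRowOn xs p = [] then none else some (p.1, PySem.Dict.mk (pvRowOn xs p)))

lemma lemA2 (xs ys : List (String × List String))
    (acc : PySem.Dict String (PySem.Dict String (List String)))
    (hnd : acc.keys.Nodup) (hfresh : ∀ p ∈ ys, acc.contains p.1 = false)
    (hys : (ys.map Prod.fst).Nodup) (hxs : (xs.map Prod.fst).Nodup) :
    ys.foldl (fun acc p => xs.foldl (FA p) acc) acc = PySem.Dict.mk (acc.items ++ pvCanonD xs ys) := by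
  induction ys generalizing acc with
  | nil => simp [pvCanonD]
  | cons p ys ih =>
    rw [List.foldl_cons, lemA0 p xs acc (hfresh p (List.mem_cons_self ..)) hnd hxs]
    have hcanon : pvCanonD xs (p :: ys) =
        (if pvRowOn xs p = [] then [] else [(p.1, PySem.Dict.mk (pvRowOn xs p))]) ++ pvCanonD xs ys := by
      simp only [pvCanonD, List.filterMap_cons]
      split_ifs <;> simp
    rw [hcanon]
    by_cases hrow : pvRowOn xs p = []
    · rw [if_pos hrow, if_pos hrow, List.nil_append]
      exact ih acc hnd (fun q h => hfresh q (List.mem_cons_of_mem _ h)) (by simpa using hys.of_cons)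
    · rw [if_neg hrow, if_neg hrow]
      have hitems : (acc.insert p.1 (PySem.Dict.mk (pvRowOn xs p))).items
          = acc.items ++ [(p.1, PySem.Dict.mk (pvRowOn xs p))] :=
        PySem.Dict.items_insert_of_not_contains acc _ (hfresh p (List.mem_cons_self ..))
      have hfresh' : ∀ q ∈ ys, (acc.insert p.1 (PySem.Dict.mk (pvRowOn xs p))).contains q.1 = false := by
        intro q hq
        rw [PySem.Dict.contains_insert, hfresh q (List.mem_cons_of_mem _ hq), Bool.or_false]
        simp only [List.map_cons, List.nodup_cons] at hys
        exact beq_eq_false_iff_ne.mpr (fun h => hys.1 (h ▸ List.mem_map_of_mem hq))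
      rw [ih _ (PySem.Dict.nodup_keys_insert _ _ _ hnd) hfresh' (by simpa using hys.of_cons)]
      rw [hitems, List.append_assoc]
-- `result[doc_id][doc_id_next] = intersection` is Dict.insert (overwrites keep position).


def pvCanon (xs : List (String × List String)) : List (String × List (String × List String)) :=
  xs.filterMap (fun p => if pvRowOn xs p = [] then none else some (p.1, pvRowOn xs p))

theorem A_eq_canon (xs : List (String × List String)) (hxs : (xs.map Prod.fst).Nodup) :
    get_doc_to_docs_with_overlap_dict xs = pvCanon xs := by
  have hunf : get_doc_to_docs_with_overlap_dict xs
      = ((xs.foldl (fun acc p => xs.foldl (FA p) acc) PySem.Dict.empty).items).map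
          (fun r => (r.1, r.2.items)) := rfl
  rw [hunf, lemA2 xs xs PySem.Dict.empty (by simp [PySem.Dict.keys, PySem.Dict.empty]) (by intro p _; rfl) hxs hxs]
  show (pvCanonD xs xs).map (fun r => (r.1, r.2.items)) = pvCanon xs
  rw [pvCanon, pvCanonD, List.map_filterMap]
  apply List.filterMap_congr
  intro p _
  split_ifs <;> rfl


def pvPos (xs : List (String × List String)) : PySem.Dict String Int :=
  (PySem.List.enumerate (xs.map Prod.fst)).foldl (fun d ip => d.insert ip.2 ip.1) PySem.Dict.empty

def pvDistinct (xs : List (String × List String)) : PySem.Dict String (List String) :=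
  xs.foldl (fun d p => d.insert p.1 (PySem.List.dedup p.2)) PySem.Dict.empty

def pvIndex (xs : List (String × List String)) : PySem.Dict String (List String) :=
  (pvDistinct xs).items.foldl (fun ix p =>
    p.2.foldl (fun ix kw => ix.modify kw [] (· ++ [p.1])) ix) PySem.Dict.empty

def pvOv (xs : List (String × List String)) (p : String × List String) : PySem.Dict String (List String) :=
  p.2.foldl (fun ov kw =>
    ((pvIndex xs).getD kw []).foldl (fun ov other =>
      if other ≠ p.1 then ov.modify other [] (· ++ [kw]) else ov) ov) PySem.Dict.empty

def pvResult (xs : List (String × List String)) : PySem.Dict String (List (String × List String)) :=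
  (pvDistinct xs).items.foldl (fun res p =>
    if (pvOv xs p).items ≠ [] then
      res.insert p.1 ((PySem.List.sorted (pvOv xs p).keys (fun o => (pvPos xs).getD o 0)).map
        (fun o => (o, PySem.Set.ofList ((pvOv xs p).getD o []))))
    else res) PySem.Dict.empty

theorem B_unfold (xs : List (String × List String)) :
    get_doc_to_docs_with_overlap_dict_alt xs = (pvResult xs).items := rfl

lemma distinct_items (xs : List (String × List String)) (hxs : (xs.map Prod.fst).Nodup) :
    (pvDistinct xs).items = xs.map (fun p => (p.1, PySem.List.dedup p.2)) := by
  have := PySem.Dict.items_foldl_insert_fresh xs Prod.fst (fun p => PySem.List.dedup p.2)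
    PySem.Dict.empty (fun a _ => rfl) hxs
  simpa [pvDistinct] using this

lemma pos_getD (xs : List (String × List String)) (hxs : (xs.map Prod.fst).Nodup)
    (k : Nat) (hk : k < (xs.map Prod.fst).length) :
    (pvPos xs).getD (xs.map Prod.fst)[k] 0 = (k : Int) := by
  set ks := xs.map Prod.fst with hks
  have hitems : (pvPos xs).items
      = (PySem.List.enumerate ks).map (fun ip => (ip.2, ip.1)) := by
    have := PySem.Dict.items_foldl_insert_fresh (PySem.List.enumerate ks)
      (fun ip => ip.2) (fun ip => ip.1) PySem.Dict.empty (fun a _ => rfl)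
      (by rw [PySem.List.map_snd_enumerate]; exact hxs)
    simpa [pvPos] using this
  have hkeys : (pvPos xs).keys.Nodup := by
    show ((pvPos xs).items.map Prod.fst).Nodup
    rw [hitems, List.map_map]
    show ((PySem.List.enumerate ks).map (fun ip => ip.2)).Nodup
    rw [PySem.List.map_snd_enumerate]; exact hxs
  have hmem : (ks[k], (k : Int)) ∈ (pvPos xs).items := by
    rw [hitems]
    have : ((0 : Int) + k, ks[k]) ∈ PySem.List.enumerate ks := by
      rw [PySem.List.mem_enumerate_iff]
      exact ⟨k, hk, rfl⟩
    simpa using List.mem_map_of_mem (f := fun ip => (ip.2, ip.1)) this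
  exact PySem.Dict.getD_of_mem_items _ hmem hkeys 0

lemma inner_append_getD (l : List String) (ix : PySem.Dict String (List String)) (doc c : String) :
    (l.foldl (fun ix kw => ix.modify kw [] (· ++ [doc])) ix).getD c []
      = ix.getD c [] ++ List.replicate (l.count c) doc := by
  induction l generalizing ix with
  | nil => simp
  | cons kw l ih =>
    rw [List.foldl_cons, ih]
    by_cases h : c = kw
    · subst h
      rw [PySem.Dict.getD_modify, if_pos rfl, List.count_cons_self, List.replicate_succ,
        List.append_assoc]
      rfl
    · rw [PySem.Dict.getD_modify, if_neg h, List.count_cons_of_ne (fun hh => h hh.symm)]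

lemma index_fold_getD (ds : List (String × List String)) (ix : PySem.Dict String (List String))
    (c : String) (hnd : ∀ p ∈ ds, p.2.Nodup) :
    (ds.foldl (fun ix p => p.2.foldl (fun ix kw => ix.modify kw [] (· ++ [p.1])) ix) ix).getD c []
      = ix.getD c [] ++ (ds.filter (fun p => decide (c ∈ p.2))).map Prod.fst := by
  induction ds generalizing ix with
  | nil => simp
  | cons p ds ih =>
    rw [List.foldl_cons, ih _ (fun q hq => hnd q (List.mem_cons_of_mem _ hq)),
      inner_append_getD, List.filter_cons]
    by_cases h : c ∈ p.2
    · rw [if_pos (by simpa using h), List.count_eq_one_of_mem (hnd p (List.mem_cons_self ..)) h]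
      simp
    · rw [if_neg (by simpa using h), List.count_eq_zero_of_not_mem h]
      simp

def pvDocsWith (xs : List (String × List String)) (c : String) : List String :=
  (xs.filter (fun p => decide (c ∈ p.2))).map Prod.fst

lemma index_getD (xs : List (String × List String)) (hxs : (xs.map Prod.fst).Nodup) (c : String) :
    (pvIndex xs).getD c [] = pvDocsWith xs c := by
  rw [pvIndex, distinct_items xs hxs,
    index_fold_getD _ _ _ (by intro p hp; simp only [List.mem_map] at hp
                              obtain ⟨q, _, rfl⟩ := hp; exact PySem.List.nodup_dedup _)]
  rw [List.filter_map, List.map_map, pvDocsWith]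
  show [] ++ _ = _
  rw [List.nil_append]
  rw [List.filter_congr (l := xs) (p := (fun p => decide (c ∈ p.2)) ∘ fun p => (p.1, PySem.List.dedup p.2))
    (q := fun p => decide (c ∈ p.2)) (by intro p _; simp [Function.comp, PySem.List.mem_dedup])]
  apply List.map_congr_left
  intro p _
  rfl

lemma ov_inner_getD (pl : List String) (ov : PySem.Dict String (List String)) (d kw o : String) :
    (pl.foldl (fun ov other => if other ≠ d then ov.modify other [] (· ++ [kw]) else ov) ov).getD o []
      = ov.getD o [] ++ (if o ≠ d then List.replicate (pl.count o) kw else []) := by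
  induction pl generalizing ov with
  | nil => simp
  | cons x pl ih =>
    rw [List.foldl_cons, ih]
    by_cases hx : x ≠ d
    · rw [if_pos hx]
      by_cases ho : o ≠ d
      · rw [if_pos ho, if_pos ho, PySem.Dict.getD_modify]
        by_cases hox : o = x
        · rw [if_pos hox, hox, List.count_cons_self, List.replicate_succ, List.append_assoc]
          rfl
        · rw [if_neg hox, List.count_cons_of_ne (fun hh => hox hh.symm)]
      · push_neg at ho
        subst ho
        rw [if_neg (by simp), if_neg (by simp), PySem.Dict.getD_modify,
          if_neg (fun hh => hx hh.symm)]
    · rw [if_neg hx]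
      push_neg at hx
      subst hx
      by_cases ho : o ≠ x
      · rw [if_pos ho, if_pos ho, List.count_cons_of_ne (fun hh => ho hh.symm)]
      · push_neg at ho
        subst ho
        simp

lemma ov_inner_mem_keys (pl : List String) (ov : PySem.Dict String (List String)) (d kw o : String) :
    o ∈ (pl.foldl (fun ov other => if other ≠ d then ov.modify other [] (· ++ [kw]) else ov) ov).keys
      ↔ (o ∈ ov.keys ∨ (o ∈ pl ∧ o ≠ d)) := by
  induction pl generalizing ov with
  | nil => simp
  | cons x pl ih =>
    rw [List.foldl_cons, ih]
    by_cases hx : x ≠ d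
    · rw [if_pos hx]
      have hkeys := PySem.Dict.keys_modify ov x [] (· ++ [kw])
      rw [hkeys]
      rw [show (ov.insert x ((· ++ [kw]) (ov.getD x []))).keys = _ from rfl]
      constructor
      · rintro (h | h)
        · rcases (PySem.Dict.mem_keys_insert _ _ _ _).mp h with h2 | h2
          · exact Or.inr ⟨h2 ▸ List.mem_cons_self .., h2 ▸ hx⟩
          · exact Or.inl h2
        · exact Or.inr ⟨List.mem_cons_of_mem _ h.1, h.2⟩
      · rintro (h | ⟨h1, h2⟩)
        · exact Or.inl ((PySem.Dict.mem_keys_insert _ _ _ _).mpr (Or.inr h))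
        · rcases List.mem_cons.mp h1 with h3 | h3
          · exact Or.inl ((PySem.Dict.mem_keys_insert _ _ _ _).mpr (Or.inl h3))
          · exact Or.inr ⟨h3, h2⟩
    · rw [if_neg hx]
      push_neg at hx
      subst hx
      constructor
      · rintro (h | h)
        · exact Or.inl h
        · exact Or.inr ⟨List.mem_cons_of_mem _ h.1, h.2⟩
      · rintro (h | ⟨h1, h2⟩)
        · exact Or.inl h
        · rcases List.mem_cons.mp h1 with h3 | h3
          · exact absurd h3 h2
          · exact Or.inr ⟨h3, h2⟩

lemma ov_inner_nodup (pl : List String) (ov : PySem.Dict String (List String)) (d kw : String)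
    (hnd : ov.keys.Nodup) :
    (pl.foldl (fun ov other => if other ≠ d then ov.modify other [] (· ++ [kw]) else ov) ov).keys.Nodup := by
  induction pl generalizing ov with
  | nil => exact hnd
  | cons x pl ih =>
    rw [List.foldl_cons]
    apply ih
    by_cases hx : x ≠ d
    · rw [if_pos hx]
      have := PySem.Dict.keys_modify ov x [] (· ++ [kw])
      have h2 : (ov.modify x [] (· ++ [kw])).keys.Nodup := by
        rw [this]
        exact PySem.Dict.nodup_keys_insert _ _ _ hnd
      exact h2
    · rwa [if_neg hx]

lemma ov_getD (IX : String → List String) (l : List String) (ov : PySem.Dict String (List String))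
    (d o : String) (hIX : ∀ kw, (IX kw).Nodup) :
    (l.foldl (fun ov kw => (IX kw).foldl
        (fun ov other => if other ≠ d then ov.modify other [] (· ++ [kw]) else ov) ov) ov).getD o []
      = ov.getD o [] ++ (if o ≠ d then l.filter (fun kw => decide (o ∈ IX kw)) else []) := by
  induction l generalizing ov with
  | nil => simp
  | cons kw l ih =>
    rw [List.foldl_cons, ih, ov_inner_getD, List.filter_cons]
    by_cases ho : o ≠ d
    · rw [if_pos ho, if_pos ho, if_pos ho, List.append_assoc]
      congr 1
      by_cases hmem : o ∈ IX kw
      · rw [if_pos (by simpa using hmem), List.count_eq_one_of_mem (hIX kw) hmem]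
        rfl
      · rw [if_neg (by simpa using hmem), List.count_eq_zero_of_not_mem hmem]
        rfl
    · rw [if_neg ho, if_neg ho, if_neg ho]
      simp

lemma ov_mem_keys (IX : String → List String) (l : List String) (ov : PySem.Dict String (List String))
    (d o : String) :
    o ∈ (l.foldl (fun ov kw => (IX kw).foldl
        (fun ov other => if other ≠ d then ov.modify other [] (· ++ [kw]) else ov) ov) ov).keys
      ↔ (o ∈ ov.keys ∨ ((∃ kw ∈ l, o ∈ IX kw) ∧ o ≠ d)) := by
  induction l generalizing ov with
  | nil => simp
  | cons kw l ih =>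
    rw [List.foldl_cons, ih, ov_inner_mem_keys]
    constructor
    · rintro (⟨h | ⟨h1, h2⟩⟩ | ⟨⟨kw', hkw', h1⟩, h2⟩)
      · exact Or.inl h
      · exact Or.inr ⟨⟨kw, List.mem_cons_self .., h1⟩, h2⟩
      · exact Or.inr ⟨⟨kw', List.mem_cons_of_mem _ hkw', h1⟩, h2⟩
    · rintro (h | ⟨⟨kw', hkw', h1⟩, h2⟩)
      · exact Or.inl (Or.inl h)
      · rcases List.mem_cons.mp hkw' with h3 | h3
        · exact Or.inl (Or.inr ⟨h3 ▸ h1, h2⟩)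
        · exact Or.inr ⟨⟨kw', h3, h1⟩, h2⟩

lemma ov_nodup (IX : String → List String) (l : List String) (ov : PySem.Dict String (List String))
    (d : String) (hnd : ov.keys.Nodup) :
    (l.foldl (fun ov kw => (IX kw).foldl
        (fun ov other => if other ≠ d then ov.modify other [] (· ++ [kw]) else ov) ov) ov).keys.Nodup := by
  induction l generalizing ov with
  | nil => exact hnd
  | cons kw l ih =>
    rw [List.foldl_cons]
    exact ih _ (ov_inner_nodup _ _ _ _ hnd)

lemma docsWith_sublist (xs : List (String × List String)) (c : String) :
    (pvDocsWith xs c).Sublist (xs.map Prod.fst) :=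
  List.Sublist.map Prod.fst (List.filter_sublist (l := xs))

lemma docsWith_nodup (xs : List (String × List String)) (hxs : (xs.map Prod.fst).Nodup) (c : String) :
    (pvDocsWith xs c).Nodup :=
  (docsWith_sublist xs c).nodup hxs

lemma mem_docsWith (xs : List (String × List String)) (c o : String) :
    o ∈ pvDocsWith xs c ↔ ∃ q ∈ xs, c ∈ q.2 ∧ q.1 = o := by
  simp only [pvDocsWith, List.mem_map, List.mem_filter, decide_eq_true_eq]
  constructor
  · rintro ⟨q, ⟨hq, hc⟩, rfl⟩; exact ⟨q, hq, hc, rfl⟩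
  · rintro ⟨q, hq, hc, rfl⟩; exact ⟨q, ⟨hq, hc⟩, rfl⟩

lemma inter_ne_nil_iff (a b : List String) :
    pvInter a b ≠ [] ↔ ∃ kw, kw ∈ a ∧ kw ∈ b := by
  simp [pvInter, PySem.Set.inter, List.filter_eq_nil_iff, PySem.Set.contains, PySem.Set.mem_ofList]

lemma pvRowOn_eq_filter_map (xs : List (String × List String)) (a : String × List String) :
    pvRowOn xs a = (xs.filter (fun q => decide (q.1 ≠ a.1 ∧ pvInter a.2 q.2 ≠ []))).map
      (fun q => (q.1, pvInter a.2 q.2)) := by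
  induction xs with
  | nil => rfl
  | cons q xs ih =>
    rw [pvRowOn_cons, ih, List.filter_cons]
    by_cases h : q.1 ≠ a.1 ∧ pvInter a.2 q.2 ≠ []
    · rw [if_pos h, if_pos (by simpa using h)]
      rfl
    · rw [if_neg h, if_neg (by simpa using h)]
      rfl

lemma keys_pairwise_pos (xs : List (String × List String)) (hxs : (xs.map Prod.fst).Nodup) :
    (xs.map Prod.fst).Pairwise (fun a b => (pvPos xs).getD a 0 < (pvPos xs).getD b 0) := by
  rw [List.pairwise_iff_getElem]
  intro i j hi hj hij
  rw [pos_getD xs hxs i hi, pos_getD xs hxs j hj]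
  exact_mod_cast hij

lemma pvOv_getD (xs : List (String × List String)) (hxs : (xs.map Prod.fst).Nodup)
    (a : String × List String) (o : String) :
    (pvOv xs a).getD o []
      = if o ≠ a.1 then a.2.filter (fun kw => decide (o ∈ pvDocsWith xs kw)) else [] := by
  have h := ov_getD (fun kw => (pvIndex xs).getD kw []) a.2 PySem.Dict.empty a.1 o
    (fun kw => by show ((pvIndex xs).getD kw []).Nodup; rw [index_getD xs hxs]; exact docsWith_nodup xs hxs kw)
  have heq : (pvOv xs a) = a.2.foldl (fun ov kw => ((fun kw => (pvIndex xs).getD kw []) kw).foldl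
      (fun ov other => if other ≠ a.1 then ov.modify other [] (· ++ [kw]) else ov) ov)
      PySem.Dict.empty := rfl
  rw [heq, h, PySem.Dict.getD_empty, List.nil_append]
  by_cases ho : o ≠ a.1
  · rw [if_pos ho, if_pos ho]
    apply List.filter_congr
    intro kw _
    show decide (o ∈ (pvIndex xs).getD kw []) = _
    rw [index_getD xs hxs kw]
  · rw [if_neg ho, if_neg ho]

lemma pvOv_mem_keys (xs : List (String × List String)) (a : String × List String) (o : String) :
    o ∈ (pvOv xs a).keys ↔ ((∃ kw ∈ a.2, o ∈ (pvIndex xs).getD kw []) ∧ o ≠ a.1) := by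
  have h := ov_mem_keys (fun kw => (pvIndex xs).getD kw []) a.2 PySem.Dict.empty a.1 o
  have heq : (pvOv xs a) = a.2.foldl (fun ov kw => ((fun kw => (pvIndex xs).getD kw []) kw).foldl
      (fun ov other => if other ≠ a.1 then ov.modify other [] (· ++ [kw]) else ov) ov)
      PySem.Dict.empty := rfl
  rw [heq, h]
  simp [PySem.Dict.keys_empty]

lemma pvOv_nodup (xs : List (String × List String)) (a : String × List String) :
    (pvOv xs a).keys.Nodup := by
  have h := ov_nodup (fun kw => (pvIndex xs).getD kw []) a.2 PySem.Dict.empty a.1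
    (by simp [PySem.Dict.keys_empty])
  exact h

lemma mem_keys_iff_row (xs : List (String × List String)) (hxs : (xs.map Prod.fst).Nodup)
    (a : String × List String) (ha : a ∈ xs) (o : String) :
    o ∈ (pvOv xs (a.1, PySem.List.dedup a.2)).keys
      ↔ ∃ q ∈ xs, (q.1 ≠ a.1 ∧ pvInter a.2 q.2 ≠ []) ∧ q.1 = o := by
  rw [pvOv_mem_keys]
  constructor
  · rintro ⟨⟨kw, hkw, hidx⟩, ho⟩
    rw [show ((a.1, PySem.List.dedup a.2)).2 = PySem.List.dedup a.2 from rfl,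
      PySem.List.mem_dedup] at hkw
    rw [index_getD xs hxs, mem_docsWith] at hidx
    obtain ⟨q, hq, hkq, rfl⟩ := hidx
    exact ⟨q, hq, ⟨ho, (inter_ne_nil_iff _ _).mpr ⟨kw, hkw, hkq⟩⟩, rfl⟩
  · rintro ⟨q, hq, ⟨hne, hint⟩, rfl⟩
    obtain ⟨kw, hka, hkq⟩ := (inter_ne_nil_iff _ _).mp hint
    refine ⟨⟨kw, ?_, ?_⟩, hne⟩
    · rw [show ((a.1, PySem.List.dedup a.2)).2 = PySem.List.dedup a.2 from rfl,
        PySem.List.mem_dedup]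
      exact hka
    · rw [index_getD xs hxs, mem_docsWith]
      exact ⟨q, hq, hkq, rfl⟩

lemma rowB_eq (xs : List (String × List String)) (hxs : (xs.map Prod.fst).Nodup)
    (a : String × List String) (ha : a ∈ xs) :
    (PySem.List.sorted (pvOv xs (a.1, PySem.List.dedup a.2)).keys
        (fun o => (pvPos xs).getD o 0)).map
      (fun o => (o, PySem.Set.ofList ((pvOv xs (a.1, PySem.List.dedup a.2)).getD o [])))
    = pvRowOn xs a := by
  set p : String × List String := (a.1, PySem.List.dedup a.2) with hp
  set Lq := xs.filter (fun q => decide (q.1 ≠ a.1 ∧ pvInter a.2 q.2 ≠ [])) with hLq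
  have hsub : (Lq.map Prod.fst).Sublist (xs.map Prod.fst) :=
    List.Sublist.map Prod.fst (List.filter_sublist (l := xs))
  have hLnodup : (Lq.map Prod.fst).Nodup := hsub.nodup hxs
  have hperm : (Lq.map Prod.fst).Perm (pvOv xs p).keys := by
    apply List.perm_of_nodup_nodup_toFinset_eq hLnodup (pvOv_nodup xs p)
    ext o
    rw [hLq]
    simp only [List.mem_toFinset, List.mem_map, List.mem_filter, decide_eq_true_eq]
    rw [mem_keys_iff_row xs hxs a ha o]
    constructor
    · rintro ⟨q, ⟨hq, hc⟩, rfl⟩; exact ⟨q, hq, hc, rfl⟩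
    · rintro ⟨q, hq, hc, rfl⟩; exact ⟨q, ⟨hq, hc⟩, rfl⟩
  have hpair : (Lq.map Prod.fst).Pairwise
      (fun x y => (pvPos xs).getD x 0 < (pvPos xs).getD y 0) :=
    (keys_pairwise_pos xs hxs).sublist hsub
  rw [PySem.List.sorted_eq_of_perm_of_pairwise_lt _ _ _ hperm hpair]
  rw [List.map_map, pvRowOn_eq_filter_map, ← hLq]
  apply List.map_congr_left
  intro q hq
  rw [hLq] at hq
  simp only [List.mem_filter, decide_eq_true_eq] at hq
  obtain ⟨hqx, hne, hint⟩ := hq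
  simp only [Function.comp]
  congr 1
  rw [pvOv_getD xs hxs p q.1, if_pos (by exact hne)]
  have hval : (PySem.List.dedup a.2).filter (fun kw => decide (q.1 ∈ pvDocsWith xs kw))
      = pvInter a.2 q.2 := by
    rw [PySem.List.dedup_eq_ofList, pvInter, PySem.Set.inter]
    apply List.filter_congr
    intro kw hkw
    have : q.1 ∈ pvDocsWith xs kw ↔ kw ∈ q.2 := by
      rw [mem_docsWith]
      constructor
      · rintro ⟨q', hq', hkq', hq'1⟩
        have : q' = q := key_inj_of_nodup xs hxs hq' hqx hq'1
        exact this ▸ hkq'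
      · intro h
        exact ⟨q, hqx, h, rfl⟩
    simp [this, PySem.Set.contains, PySem.Set.mem_ofList]
  show PySem.Set.ofList ((p.2).filter (fun kw => decide (q.1 ∈ pvDocsWith xs kw))) = _
  rw [show p.2 = PySem.List.dedup a.2 from rfl, hval]
  apply PySem.Set.ofList_eq_self_of_nodup
  rw [← hval]
  exact (PySem.List.nodup_dedup a.2).filter _

lemma ovItems_nil_iff (xs : List (String × List String)) (hxs : (xs.map Prod.fst).Nodup)
    (a : String × List String) (ha : a ∈ xs) :
    ((pvOv xs (a.1, PySem.List.dedup a.2)).items = []) ↔ pvRowOn xs a = [] := by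
  have hkeys : (pvOv xs (a.1, PySem.List.dedup a.2)).items = [] ↔
      (pvOv xs (a.1, PySem.List.dedup a.2)).keys = [] := by
    constructor
    · intro h; show List.map _ _ = []; rw [h]; rfl
    · intro h
      have : List.map Prod.fst (pvOv xs (a.1, PySem.List.dedup a.2)).items = [] := h
      exact List.map_eq_nil_iff.mp this
  rw [hkeys, pvRowOn_eq_filter_map]
  rw [List.eq_nil_iff_forall_not_mem, List.map_eq_nil_iff, List.eq_nil_iff_forall_not_mem]
  constructor
  · intro h q hq
    have := h q.1
    rw [mem_keys_iff_row xs hxs a ha] at this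
    have hq' := List.mem_filter.mp hq
    exact this ⟨q, hq'.1, by simpa using hq'.2, rfl⟩
  · intro h o ho
    rw [mem_keys_iff_row xs hxs a ha] at ho
    obtain ⟨q, hq, hc, rfl⟩ := ho
    exact h q (List.mem_filter.mpr ⟨hq, by simpa using hc⟩)

lemma foldl_guard_insert_items (ds : List (String × List String))
    (g : (String × List String) → Prop) [DecidablePred g]
    (f : (String × List String) → List (String × List String))
    (res : PySem.Dict String (List (String × List String)))
    (hfresh : ∀ p ∈ ds, res.contains p.1 = false) (hds : (ds.map Prod.fst).Nodup) :
    (ds.foldl (fun res p => if g p then res.insert p.1 (f p) else res) res).items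
      = res.items ++ ds.filterMap (fun p => if g p then some (p.1, f p) else none) := by
  induction ds generalizing res with
  | nil => simp
  | cons p ds ih =>
    rw [List.foldl_cons, List.filterMap_cons]
    by_cases hg : g p
    · rw [if_pos hg, if_pos hg]
      have hfresh' : ∀ q ∈ ds, (res.insert p.1 (f p)).contains q.1 = false := by
        intro q hq
        rw [PySem.Dict.contains_insert, hfresh q (List.mem_cons_of_mem _ hq), Bool.or_false]
        simp only [List.map_cons, List.nodup_cons] at hds
        exact beq_eq_false_iff_ne.mpr (fun h => hds.1 (h ▸ List.mem_map_of_mem hq))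
      rw [ih _ hfresh' (by simpa using hds.of_cons)]
      rw [PySem.Dict.items_insert_of_not_contains res _ (hfresh p (List.mem_cons_self ..)),
        List.append_assoc]
      rfl
    · rw [if_neg hg, if_neg hg]
      exact ih res (fun q hq => hfresh q (List.mem_cons_of_mem _ hq)) (by simpa using hds.of_cons)

theorem B_eq_canon (xs : List (String × List String)) (hxs : (xs.map Prod.fst).Nodup) :
    get_doc_to_docs_with_overlap_dict_alt xs = pvCanon xs := by
  rw [B_unfold]
  have hshape : pvResult xs = (pvDistinct xs).items.foldl
      (fun res p => if (fun p => (pvOv xs p).items ≠ []) p then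
          res.insert p.1 ((fun p => (PySem.List.sorted (pvOv xs p).keys
              (fun o => (pvPos xs).getD o 0)).map
            (fun o => (o, PySem.Set.ofList ((pvOv xs p).getD o [])))) p)
        else res) PySem.Dict.empty := rfl
  have hdsnd : ((pvDistinct xs).items.map Prod.fst).Nodup := by
    rw [distinct_items xs hxs, List.map_map]
    exact hxs
  rw [hshape, foldl_guard_insert_items _ _ _ _ (fun p _ => rfl) hdsnd]
  rw [show (PySem.Dict.empty : PySem.Dict String (List (String × List String))).items = [] from rfl,
    List.nil_append]
  rw [distinct_items xs hxs, List.filterMap_map, pvCanon]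
  apply List.filterMap_congr
  intro a ha
  simp only [Function.comp]
  by_cases hrow : pvRowOn xs a = []
  · rw [if_neg, if_pos hrow]
    simp only [ne_eq, Decidable.not_not]
    exact (ovItems_nil_iff xs hxs a ha).mpr hrow
  · rw [if_pos, if_neg hrow]
    · rw [rowB_eq xs hxs a ha]
    · simp only [ne_eq]
      exact fun h => hrow ((ovItems_nil_iff xs hxs a ha).mp h)


-- ===== VERDICT (by name: the statement is the Claim_ definition above) =====
theorem get_doc_to_docs_with_overlap_dict_spec : Claim_equal_get_doc_to_docs_with_overlap_dict := by
  intro xs _hdom hpre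
  unfold Spec_get_doc_to_docs_with_overlap_dict
  exact (A_eq_canon xs hpre).trans (B_eq_canon xs hpre).symm
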